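-- pv_equiv track=rewrite | github.com/Sharon271121/Projects | Computational physics/Poisson_s equation 2D/poisson_2D_fortran.py | dcheby
-- ===== SOURCE A (Python) =====
-- def cheby(m,r):
--   cheby0 = 1
--   cheby1 = r
--   chebyn = 0
--   if m == 0:
--     cheby = cheby0
--   elif m == 1:
--     cheby = cheby1
--   elif m >= 2:
--     for i in range(2, m+1):
--       chebyn = 2*r*cheby1 - cheby0
--       cheby0 = cheby1
--       cheby1 = chebyn
--     cheby = chebyn
--   return cheby
--
-- def dcheby(m,r):
--   dcheby0 = 0
--   dcheby1 = 1
--   dchebyn = 0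
--   if m == 0:
--     dcheby = dcheby0
--   elif m == 1:
--     dcheby = dcheby1
--   elif m >= 2:
--     for i in range(2,m+1):
--       dchebyn = 2*cheby(i-1,r) + 2*r*dcheby1 - dcheby0
--       dcheby0 = dcheby1
--       dcheby1 = dchebyn
--     dcheby = dchebyn
--   return dcheby
-- ===== SOURCE B (Python) =====
-- def dcheby(m, r):
--     if m == 0:
--         return 0
--     d0, d1 = 0, 1      # T'_0, T'_1
--     c0, c1 = 1, r      # T_0,  T_1
--     for i in range(2, m + 1):
--         d0, d1 = d1, 2 * c1 + 2 * r * d1 - d0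
--         c0, c1 = c1, 2 * r * c1 - c0
--     return d1
-- ===== Notes on version B (the rewrite author's own statement) =====
-- stated objective: faster
-- what changed: B maintains the Chebyshev values T_{i-1},T_i incrementally alongside the derivative recurrence in one loop, instead of A's call to cheby() (a full O(i) recomputation) at every iteration.
import Mathlib
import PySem

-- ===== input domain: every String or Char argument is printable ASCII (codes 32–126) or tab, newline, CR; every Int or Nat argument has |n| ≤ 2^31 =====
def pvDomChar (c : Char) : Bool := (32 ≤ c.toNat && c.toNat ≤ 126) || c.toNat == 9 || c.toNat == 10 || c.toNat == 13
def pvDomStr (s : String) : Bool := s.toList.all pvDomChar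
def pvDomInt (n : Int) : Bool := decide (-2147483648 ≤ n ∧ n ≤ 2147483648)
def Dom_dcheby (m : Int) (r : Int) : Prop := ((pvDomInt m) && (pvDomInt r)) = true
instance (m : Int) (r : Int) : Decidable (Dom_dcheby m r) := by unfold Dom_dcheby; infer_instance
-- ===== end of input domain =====

-- B replaces A's per-iteration O(i) recomputation of cheby(i-1,r) by carrying the
-- Chebyshev pair incrementally in the same loop: O(m) instead of O(m^2).

-- ===== PORT A =====
-- literal port of the helper cheby(m, r); for m < 0 Python raises (unreachable from dcheby's Pre_)
def cheby (m : Int) (r : Int) : Int :=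
  let cheby0 : Int := 1
  let cheby1 : Int := r
  let chebyn : Int := 0
  if m == 0 then cheby0
  else if m == 1 then cheby1
  else if m ≥ 2 then
    let s := (PySem.List.pyRange 2 (m+1) 1).foldl
      (fun (st : Int × Int × Int) (_i : Int) =>
        let chebyn := 2*r*st.2.1 - st.1
        (st.2.1, chebyn, chebyn))
      (cheby0, cheby1, chebyn)
    s.2.2
  else 0

def dcheby (m : Int) (r : Int) : Int :=
  let dcheby0 : Int := 0
  let dcheby1 : Int := 1
  let dchebyn : Int := 0
  if m == 0 then dcheby0
  else if m == 1 then dcheby1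
  else if m ≥ 2 then
    let s := (PySem.List.pyRange 2 (m+1) 1).foldl
      (fun (st : Int × Int × Int) (i : Int) =>
        let dchebyn := 2*cheby (i-1) r + 2*r*st.2.1 - st.1
        (st.2.1, dchebyn, dchebyn))
      (dcheby0, dcheby1, dchebyn)
    s.2.2
  else 0

-- ===== PORT B =====
def dcheby_alt (m : Int) (r : Int) : Int :=
  if m == 0 then 0
  else
    let s := (PySem.List.pyRange 2 (m+1) 1).foldl
      (fun (st : Int × Int × Int × Int) (_i : Int) =>
        -- st = (d0, d1, c0, c1)
        (st.2.1, 2*st.2.2.2 + 2*r*st.2.1 - st.1, st.2.2.2, 2*r*st.2.2.2 - st.2.2.1))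
      (0, 1, 1, r)
    s.2.1

-- ===== PRECONDITION & SPEC =====
-- Pre_ excludes only m < 0, on which Python A raises UnboundLocalError (no branch assigns the local).
def Pre_dcheby (m : Int) (r : Int) : Prop := 0 ≤ m
instance (m : Int) (r : Int) : Decidable (Pre_dcheby m r) := by unfold Pre_dcheby; infer_instance
def pvWitness_dcheby : Int × Int := (5, 3)

def Spec_dcheby (m : Int) (r : Int) (out : Int) : Prop := out = dcheby_alt m r
instance (m : Int) (r : Int) (out : Int) : Decidable (Spec_dcheby m r out) := by unfold Spec_dcheby; infer_instance

-- ===== CLAIM (what is proved, stated in full; the proofs are below) =====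
def Claim_equal_dcheby : Prop := ∀ (m : Int) (r : Int), Dom_dcheby m r → Pre_dcheby m r → Spec_dcheby m r (dcheby m r)

-- ===== LEMMAS AND PROOFS =====

-- reference recurrences (proof-only)
def chebP (r : Int) : Nat → Int
  | 0 => 1
  | 1 => r
  | n+2 => 2*r*chebP r (n+1) - chebP r n

def dchebP (r : Int) : Nat → Int
  | 0 => 0
  | 1 => 1
  | n+2 => 2*chebP r (n+1) + 2*r*dchebP r (n+1) - dchebP r n

theorem chebyFold (r : Int) (n : Nat) :
    (PySem.List.pyRange 2 (2 + (n : Int)) 1).foldl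
      (fun (st : Int × Int × Int) (_i : Int) =>
        let chebyn := 2*r*st.2.1 - st.1
        (st.2.1, chebyn, chebyn))
      (1, r, 0)
    = (chebP r n, chebP r (n+1), if n = 0 then 0 else chebP r (n+1)) := by
  induction n with
  | zero => simp [PySem.List.pyRange_one_eq_nil, chebP]
  | succ k ih =>
      have h : (2 : Int) + (k+1 : Nat) = (2 + (k : Int)) + 1 := by push_cast; ring
      rw [h, PySem.List.pyRange_one_succ_right (by omega), List.foldl_append, ih]
      simp [chebP]

theorem cheby_eq (r : Int) (n : Nat) : cheby (n : Int) r = chebP r n := by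
  match n with
  | 0 => simp [cheby, chebP]
  | 1 => simp [cheby, chebP]
  | (k+2) =>
      have h2 : ¬ ((k+2 : Nat) : Int) == 0 := by simp; omega
      have h3 : ¬ ((k+2 : Nat) : Int) == 1 := by simp; omega
      have h4 : ((k+2 : Nat) : Int) ≥ 2 := by push_cast; omega
      have h5 : ((k+2 : Nat) : Int) + 1 = 2 + ((k+1 : Nat) : Int) := by push_cast; ring
      simp only [cheby, h2, h3, h4, if_false, if_true, Bool.false_eq_true]
      rw [h5, chebyFold]
      simp

theorem dchebyFoldA (r : Int) (n : Nat) :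
    (PySem.List.pyRange 2 (2 + (n : Int)) 1).foldl
      (fun (st : Int × Int × Int) (i : Int) =>
        let dchebyn := 2*cheby (i-1) r + 2*r*st.2.1 - st.1
        (st.2.1, dchebyn, dchebyn))
      (0, 1, 0)
    = (dchebP r n, dchebP r (n+1), if n = 0 then 0 else dchebP r (n+1)) := by
  induction n with
  | zero => simp [PySem.List.pyRange_one_eq_nil, dchebP]
  | succ k ih =>
      have h : (2 : Int) + (k+1 : Nat) = (2 + (k : Int)) + 1 := by push_cast; ring
      rw [h, PySem.List.pyRange_one_succ_right (by omega), List.foldl_append, ih]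
      have hc : (2 + (k : Int)) - 1 = ((k+1 : Nat) : Int) := by push_cast; ring
      have hce : cheby ((k : Int)+1) r = chebP r (k+1) := by
        have := cheby_eq r (k+1); push_cast at this; exact this
      simp [hc, hce, dchebP]

theorem dchebyFoldB (r : Int) (n : Nat) :
    (PySem.List.pyRange 2 (2 + (n : Int)) 1).foldl
      (fun (st : Int × Int × Int × Int) (_i : Int) =>
        (st.2.1, 2*st.2.2.2 + 2*r*st.2.1 - st.1, st.2.2.2, 2*r*st.2.2.2 - st.2.2.1))
      (0, 1, 1, r)
    = (dchebP r n, dchebP r (n+1), chebP r n, chebP r (n+1)) := by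
  induction n with
  | zero => simp [PySem.List.pyRange_one_eq_nil, dchebP, chebP]
  | succ k ih =>
      have h : (2 : Int) + (k+1 : Nat) = (2 + (k : Int)) + 1 := by push_cast; ring
      rw [h, PySem.List.pyRange_one_succ_right (by omega), List.foldl_append, ih]
      simp [dchebP, chebP]

-- ===== VERDICT (by name: the statement is the Claim_ definition above) =====
theorem dcheby_spec : Claim_equal_dcheby := by
  intro m r _ hpre
  unfold Spec_dcheby dcheby dcheby_alt
  by_cases h0 : m = 0
  · simp [h0]
  · by_cases h1 : m = 1
    · subst h1
      simp [PySem.List.pyRange_one_eq_nil]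
    · have h2 : m ≥ 2 := by
        have : 0 ≤ m := hpre
        omega
      have hm0 : ¬ (m == 0) := by simp [h0]
      have hm1 : ¬ (m == 1) := by simp [h1]
      obtain ⟨n, hn⟩ : ∃ n : Nat, m = (n : Int) + 1 ∧ 1 ≤ n := by
        refine ⟨(m-1).toNat, ?_, ?_⟩ <;> omega
      obtain ⟨hn, hn1⟩ := hn
      have hmp : m + 1 = 2 + ((n : Nat) : Int) := by omega
      simp only [hm0, hm1, if_false, Bool.false_eq_true]
      rw [if_pos h2, hmp, dchebyFoldA, dchebyFoldB]
      have : n ≠ 0 := by omega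
      simp [this]
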